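-- pv_equiv track=rewrite | github.com/Craizox/ftp-fuzzer | ftp_fuzzer.py | cyclicPattern
-- ===== SOURCE A (Python) =====
-- def cyclicPattern(length):
--     buffer = ""
--     while True:
--         for i in range(26):
--             for j in range(26):
--                 for k in range(10):
--                     buffer += chr(65 + i) + chr(97 + j) + chr(48 + k)
--                     if len(buffer) >= length:
--                         return buffer[:length]
-- ===== SOURCE B (Python) =====
-- _PERIOD = ''.join(chr(65 + i) + chr(97 + j) + chr(48 + k)
--                   for i in range(26) for j in range(26) for k in range(10))
--
--
-- def cyclicPattern(length):
--     # smallest multiple of 3 that is >= length, but at least one 3-char group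
--     m = max(3, ((length + 2) // 3) * 3)
--     buffer = (_PERIOD * (m // len(_PERIOD) + 1))[:m]
--     return buffer[:length]
-- ===== Notes on version B (the rewrite author's own statement) =====
-- stated objective: faster
-- what changed: B precomputes the full Metasploit period string once and produces the result by string tiling and slicing, replacing A's triple nested loop that grows the buffer three characters at a time with a length check after every group.
import Mathlib
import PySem

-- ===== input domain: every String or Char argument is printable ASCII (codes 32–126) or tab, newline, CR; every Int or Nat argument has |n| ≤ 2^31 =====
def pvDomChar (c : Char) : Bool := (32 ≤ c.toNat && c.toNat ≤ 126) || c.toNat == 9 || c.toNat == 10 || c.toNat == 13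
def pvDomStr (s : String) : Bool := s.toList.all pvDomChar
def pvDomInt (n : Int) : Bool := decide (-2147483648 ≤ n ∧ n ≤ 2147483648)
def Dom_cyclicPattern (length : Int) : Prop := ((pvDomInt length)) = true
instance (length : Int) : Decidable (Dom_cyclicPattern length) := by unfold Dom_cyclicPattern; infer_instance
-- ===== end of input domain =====

-- B replaces A's per-group string growth with one precomputed period string,
-- tiled and sliced (objective: faster, constant-factor bulk copying).

-- ===== PORT A =====
-- A's triple nested for-loop with early return, folded over the list of (i,j,k)
-- triples; range(26)/range(10) ported as List.range (exact); chr(65+i) etc. is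
-- Char.ofNat, exact on this ASCII range.
def pvEnc (t : Nat × Nat × Nat) : List Char :=
  [Char.ofNat (65 + t.1), Char.ofNat (97 + t.2.1), Char.ofNat (48 + t.2.2)]

def pvGroups : List (Nat × Nat × Nat) :=
  (List.range 26).flatMap fun i =>
    (List.range 26).flatMap fun j =>
      (List.range 10).map fun k => (i, j, k)

-- one iteration of the innermost body: append the 3-char group, return buffer[:length] if long enough
def pvStepA (length : Int) (st : List Char ⊕ List Char) (t : Nat × Nat × Nat) : List Char ⊕ List Char :=
  match st with
  | .inl ans => .inl ans
  | .inr buf =>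
    let buf := buf ++ pvEnc t
    if length ≤ (buf.length : Int) then .inl (PySem.List.slice buf none (some length))
    else .inr buf

-- the 'while True' loop; fuel only makes the recursion total (proved sufficient below)
def pvLoopA (length : Int) : Nat → List Char → List Char
  | 0, buf => buf
  | fuel + 1, buf =>
    Sum.elim id (pvLoopA length fuel) (pvGroups.foldl (pvStepA length) (.inr buf))

def cyclicPattern (length : Int) : String :=
  String.ofList (pvLoopA length (length.toNat / 20280 + 1) [])

-- ===== PORT B =====
-- the precomputed period _PERIOD
def pvPeriod : List Char :=
  (List.range 26).flatMap fun i =>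
    (List.range 26).flatMap fun j =>
      (List.range 10).flatMap fun k =>
        [Char.ofNat (65 + i), Char.ofNat (97 + j), Char.ofNat (48 + k)]

def cyclicPattern_alt (length : Int) : String :=
  let m : Int := max 3 (PySem.Int.floordiv (length + 2) 3 * 3)
  let reps : Int := PySem.Int.floordiv m (pvPeriod.length : Int) + 1
  let buffer := PySem.List.slice ((List.replicate reps.toNat pvPeriod).flatten) none (some m)
  String.ofList (PySem.List.slice buffer none (some length))

-- ===== PRECONDITION & SPEC =====
def Spec_cyclicPattern (length : Int) (out : String) : Prop := out = cyclicPattern_alt length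
instance (length : Int) (out : String) : Decidable (Spec_cyclicPattern length out) := by unfold Spec_cyclicPattern; infer_instance

-- ===== CLAIM (what is proved, stated in full; the proofs are below) =====
def Claim_equal_cyclicPattern : Prop := ∀ (length : Int), Dom_cyclicPattern length → Spec_cyclicPattern length (cyclicPattern length)

-- ===== LEMMAS AND PROOFS =====

theorem pvPeriod_len : pvPeriod.length = 20280 := by
  simp [pvPeriod]

theorem pvGroups_len : pvGroups.length = 6760 := by
  simp [pvGroups]

theorem pvFlattenGroups : (pvGroups.map pvEnc).flatten = pvPeriod := by
  simp [pvGroups, pvPeriod, pvEnc, ← List.flatMap_def, List.flatMap_assoc, List.flatMap_map]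

theorem pvRange26 : List.range 26 = 0 :: List.map Nat.succ (List.range 25) := by
  rw [show (26 : Nat) = 25 + 1 by norm_num, List.range_succ_eq_map]

theorem pvRange10 : List.range 10 = 0 :: List.map Nat.succ (List.range 9) := by
  rw [show (10 : Nat) = 9 + 1 by norm_num, List.range_succ_eq_map]

theorem pvGroups_head : ∃ rest, pvGroups = (0, 0, 0) :: rest := by
  rw [pvGroups, pvRange26, pvRange10]
  simp only [List.flatMap_cons, List.map_cons, List.cons_append]
  exact ⟨_, rfl⟩

theorem pvPeriod_head : ∃ rest, pvPeriod = 'A' :: 'a' :: '0' :: rest := by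
  rw [pvPeriod, pvRange26, pvRange10]
  simp only [List.flatMap_cons, List.cons_append]
  exact ⟨_, rfl⟩

theorem pvEnc_len (t : Nat × Nat × Nat) : (pvEnc t).length = 3 := rfl

theorem pvFoldl_inl (L : Int) (a : List Char) (ts : List (Nat × Nat × Nat)) :
    ts.foldl (pvStepA L) (.inl a) = .inl a := by
  induction ts <;> simp_all [pvStepA]

theorem pvRepLen (p : Nat) : ((List.replicate p pvPeriod).flatten).length = 20280 * p := by
  induction p with
  | zero => simp
  | succ q ih => simp [List.replicate_succ, ih, pvPeriod_len]; ring

theorem pvRepSucc (p : Nat) :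
    (List.replicate p pvPeriod).flatten ++ pvPeriod = (List.replicate (p + 1) pvPeriod).flatten := by
  rw [List.replicate_succ' (n := p), List.flatten_append]
  simp

theorem pvTakeRep (n a b : Nat) (h : n ≤ 20280 * a) (hab : a ≤ b) :
    ((List.replicate a pvPeriod).flatten).take n = ((List.replicate b pvPeriod).flatten).take n := by
  have : b = a + (b - a) := by omega
  rw [this, List.replicate_add, List.flatten_append,
      List.take_append_of_le_length (by rw [pvRepLen]; exact h)]

-- one full pass of the triple loop, for positive target length
theorem pvPass (L : Int) (hL : 0 < L) :
    ∀ (ts : List (Nat × Nat × Nat)) (b : List Char), (b.length : Int) < L →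
      ts.foldl (pvStepA L) (.inr b) =
        if L ≤ (b.length : Int) + 3 * ts.length then
          .inl ((b ++ (ts.map pvEnc).flatten).take L.toNat)
        else .inr (b ++ (ts.map pvEnc).flatten) := by
  intro ts
  induction ts with
  | nil =>
    intro b hb
    simp only [List.foldl_nil, List.length_nil, List.map_nil, List.flatten_nil, List.append_nil]
    rw [if_neg (by push_cast; omega)]
  | cons t ts ih =>
    intro b hb
    have hlen : ((b ++ pvEnc t).length : Int) = (b.length : Int) + 3 := by
      simp [pvEnc_len]
    have hcons : (((t :: ts).length : Nat) : Int) = (ts.length : Int) + 1 := by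
      simp
    by_cases hc : L ≤ (b.length : Int) + 3
    · have hstep : pvStepA L (.inr b) t = .inl (PySem.List.slice (b ++ pvEnc t) none (some L)) := by
        simp only [pvStepA]
        rw [if_pos (by omega)]
      rw [List.foldl_cons, hstep, pvFoldl_inl,
          PySem.List.slice_to _ (le_of_lt hL),
          if_pos (by rw [hcons]; omega)]
      congr 1
      simp only [List.map_cons, List.flatten_cons]
      conv_rhs => rw [← List.append_assoc]
      rw [List.take_append_of_le_length (l₁ := b ++ pvEnc t)
            (by simp only [List.length_append, pvEnc_len]; omega)]
    · have hstep : pvStepA L (.inr b) t = .inr (b ++ pvEnc t) := by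
        simp only [pvStepA]
        rw [if_neg (by omega)]
      rw [List.foldl_cons, hstep, ih (b ++ pvEnc t) (by omega)]
      simp only [List.map_cons, List.flatten_cons, ← List.append_assoc]
      exact if_congr (by rw [hlen, hcons]; constructor <;> intro <;> omega) rfl rfl

-- the outer while-loop, with enough fuel, starting from p completed periods
theorem pvLoopA_succ (L : Int) (f : Nat) (buf : List Char) :
    pvLoopA L (f + 1) buf =
      Sum.elim id (pvLoopA L f) (pvGroups.foldl (pvStepA L) (.inr buf)) := by
  rw [pvLoopA]

theorem pvLoop (L : Int) (hL : 0 < L) :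
    ∀ (fuel p : Nat), ((20280 * p : Nat) : Int) < L → L ≤ ((20280 * (p + fuel) : Nat) : Int) →
      pvLoopA L fuel ((List.replicate p pvPeriod).flatten) =
        ((List.replicate (p + fuel) pvPeriod).flatten).take L.toNat := by
  intro fuel
  induction fuel with
  | zero => intro p h1 h2; exfalso; push_cast at h1 h2; omega
  | succ f ih =>
    intro p h1 h2
    have hb : (((List.replicate p pvPeriod).flatten).length : Int) < L := by
      rw [pvRepLen]; exact_mod_cast h1
    rw [pvLoopA_succ, pvPass L hL pvGroups _ hb, pvFlattenGroups, pvGroups_len, pvRepLen]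
    by_cases hc : L ≤ ((20280 * p : Nat) : Int) + 3 * (6760 : Nat)
    · rw [if_pos hc, Sum.elim_inl, id_eq]
      rw [pvRepSucc p]
      exact pvTakeRep _ _ _ (by push_cast at hc ⊢; omega) (by omega)
    · rw [if_neg hc, Sum.elim_inr]
      rw [pvRepSucc p]
      rw [ih (p + 1) (by push_cast at hc ⊢; omega) (by push_cast at h2 ⊢; omega),
          show p + 1 + f = p + (f + 1) by omega]

-- ===== VERDICT (by name: the statement is the Claim_ definition above) =====
theorem cyclicPattern_spec : Claim_equal_cyclicPattern := by
  intro L _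
  show cyclicPattern L = cyclicPattern_alt L
  simp only [cyclicPattern, cyclicPattern_alt, pvPeriod_len, Nat.cast_ofNat]
  rw [PySem.Int.floordiv_eq_ediv_of_pos (a := L + 2) (show (0:Int) < 3 by norm_num)]
  by_cases hL : 0 < L
  · -- positive length
    have hm3 : max 3 ((L + 2) / 3 * 3) = (L + 2) / 3 * 3 := by omega
    rw [hm3,
        PySem.Int.floordiv_eq_ediv_of_pos (a := (L + 2) / 3 * 3) (show (0:Int) < 20280 by norm_num)]
    set M : Int := (L + 2) / 3 * 3 with hM
    set R : Int := M / 20280 + 1 with hR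
    have hMb : L ≤ M ∧ M ≤ L + 2 := by rw [hM]; omega
    have hRb : 0 < R ∧ M < 20280 * R := by rw [hR]; omega
    -- A side: enough fuel for L.toNat / 20280 + 1 passes
    have hfuel : L ≤ ((20280 * (0 + (L.toNat / 20280 + 1)) : Nat) : Int) := by
      have := Nat.div_add_mod L.toNat 20280
      push_cast; omega
    rw [show ([] : List Char) = (List.replicate 0 pvPeriod).flatten from rfl,
        pvLoop L hL _ 0 (by simpa using hL) hfuel]
    -- B side: both slices are takes, collapse and retile
    rw [PySem.List.slice_to _ (by omega : (0:Int) ≤ M), PySem.List.slice_to _ (le_of_lt hL),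
        List.take_take]
    have hmin : min L.toNat M.toNat = L.toNat := by omega
    rw [hmin]
    congr 1
    rw [pvTakeRep L.toNat (0 + (L.toNat / 20280 + 1)) (0 + (L.toNat / 20280 + 1) + R.toNat)
          (by push_cast at hfuel ⊢; omega) (by omega),
        pvTakeRep L.toNat R.toNat (0 + (L.toNat / 20280 + 1) + R.toNat)
          (by omega) (by omega)]
  · -- length <= 0 : A returns after the very first group; B's buffer is also "Aa0"
    have hm : max 3 ((L + 2) / 3 * 3) = 3 := by omega
    rw [hm]
    have hreps : PySem.Int.floordiv (3 : Int) 20280 + 1 = 1 := by decide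
    rw [hreps]
    obtain ⟨pr, hpr⟩ := pvPeriod_head
    have hbuf : PySem.List.slice ((List.replicate (1 : Int).toNat pvPeriod).flatten) none (some 3)
        = ['A', 'a', '0'] := by
      rw [PySem.List.slice_to _ (by norm_num)]
      simp [hpr]
    rw [hbuf]
    -- A side: fuel = 0 / 20280 + 1 = 1, return fires at the first group
    have hLt : L.toNat = 0 := by omega
    rw [hLt]
    show String.ofList (pvLoopA L 1 []) = _
    obtain ⟨gr, hgr⟩ := pvGroups_head
    have hA : pvLoopA L 1 ([] : List Char) =
        Sum.elim id (pvLoopA L 0) (pvGroups.foldl (pvStepA L) (.inr [])) := pvLoopA_succ L 0 []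
    rw [hA, hgr, List.foldl_cons]
    have hstep : pvStepA L (.inr []) (0, 0, 0) =
        .inl (PySem.List.slice ['A', 'a', '0'] none (some L)) := by
      simp only [pvStepA]
      rw [if_pos (by simp [pvEnc]; omega)]
      rfl
    rw [hstep, pvFoldl_inl, Sum.elim_inl, id_eq]
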